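-- pv_equiv track=rewrite | github.com/PraderioM/GamePlatform | backend/games/sudoku/endpoints/create_sudoku.py | permute_sudoku_blocks_horizontally
-- ===== SOURCE A (Python) =====
-- from typing import List
--
-- def permute_sudoku_blocks_horizontally(table: List[List[int]], permutation: List[int]) -> List[List[int]]:
--     # Setup.
--     height = len(table)
--     width = len(table[0])
--     n_blocks = len(permutation)
--     block_length = int(width / n_blocks)
--     out_table = [row[:] for row in table]
--
--     # Permutation.
--     for dst_index, src_index in enumerate(permutation):
--         for col in range(block_length):
--             dst_col = dst_index * block_length + col
--             src_col = src_index * block_length + col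
--             for row in range(height):
--                 out_table[row][dst_col] = table[row][src_col]
--
--     return out_table
-- ===== SOURCE B (Python) =====
-- from typing import List
--
--
-- def permute_sudoku_blocks_horizontally(table: List[List[int]], permutation: List[int]) -> List[List[int]]:
--     width = len(table[0])
--     n_blocks = len(permutation)
--     block_length = int(width / n_blocks)
--     tail_start = n_blocks * block_length
--     result = []
--     for row in table:
--         new_row = []
--         for src in permutation:
--             new_row.extend(row[src * block_length:(src + 1) * block_length])
--         new_row.extend(row[tail_start:])
--         result.append(new_row)
--     return result
-- ===== Notes on version B (the rewrite author's own statement) =====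
-- stated objective: simpler
-- what changed: Replaces A's triple-nested per-cell index assignment into a mutable copy by a single row-wise pass that builds each output row as a concatenation of block-sized slices in permuted order plus the trailing columns.
-- outside the precondition, e.g. on permute_sudoku_blocks_horizontally([[1, 2]], [-1, 0]): A returns [[2, 1]], B returns [[1]]
import Mathlib
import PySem

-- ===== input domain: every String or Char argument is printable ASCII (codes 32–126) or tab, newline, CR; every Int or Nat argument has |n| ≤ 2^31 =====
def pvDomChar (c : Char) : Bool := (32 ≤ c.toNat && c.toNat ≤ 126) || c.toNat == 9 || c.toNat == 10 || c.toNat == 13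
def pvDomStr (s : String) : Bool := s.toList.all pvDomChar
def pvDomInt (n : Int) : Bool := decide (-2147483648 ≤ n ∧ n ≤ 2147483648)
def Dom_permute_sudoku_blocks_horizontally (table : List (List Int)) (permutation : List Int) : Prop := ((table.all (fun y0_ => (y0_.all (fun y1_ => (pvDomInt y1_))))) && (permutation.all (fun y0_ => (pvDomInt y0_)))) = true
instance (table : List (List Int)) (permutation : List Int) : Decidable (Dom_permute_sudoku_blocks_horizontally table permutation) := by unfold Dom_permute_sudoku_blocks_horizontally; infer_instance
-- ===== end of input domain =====

-- B builds each output row in one row-wise pass by concatenating block-sized slices in permuted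
-- order plus the trailing columns, instead of A's triple-nested per-cell assignment into a copy.
-- (A mutates only its own fresh copy, so return-value equivalence is full equivalence.)


-- ===== PORT A =====
-- Literal port of A.  'width = len(table[0])' raises on an empty table in Python (excluded by
-- Pre_); 'int(width / n_blocks)' is floor division here since width, n_blocks ≥ 0 (n_blocks > 0
-- inside Pre_).  The in-place writes 'out_table[row][dst_col] = …' become pySetD read-modify-write.
def permute_sudoku_blocks_horizontally (table : List (List Int)) (permutation : List Int) : List (List Int) :=
  let height := table.length
  let width := (table.headI).length
  let n_blocks := permutation.length
  let block_length := width / n_blocks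
  let out_table := table.map (fun row => PySem.List.slice row none none)
  (PySem.List.enumerate permutation).foldl (fun out p =>
    (List.range block_length).foldl (fun out (col : Nat) =>
      let dst_col : Int := p.1 * (block_length : Int) + (col : Int)
      let src_col : Int := p.2 * (block_length : Int) + (col : Int)
      (List.range height).foldl (fun out (row : Nat) =>
        PySem.List.pySetD out (row : Int)
          (PySem.List.pySetD (PySem.List.pyGetD out (row : Int) [])
            dst_col
            (PySem.List.pyGetD (PySem.List.pyGetD table (row : Int) []) src_col 0))) out) out) out_table

-- ===== PORT B =====
def permute_sudoku_blocks_horizontally_alt (table : List (List Int)) (permutation : List Int) : List (List Int) :=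
  let width := (table.headI).length
  let n_blocks := permutation.length
  let block_length := width / n_blocks
  let tail_start := n_blocks * block_length
  table.map (fun row =>
    (permutation.foldl (fun new_row src =>
        new_row ++ PySem.List.slice row (some (src * (block_length : Int)))
                                        (some ((src + 1) * (block_length : Int)))) [])
      ++ PySem.List.slice row (some (tail_start : Int)) none)

-- ===== PRECONDITION & SPEC =====
-- Pre_ restricts to the natural domain: it excludes inputs where A raises (empty table, empty
-- permutation, a block reaching past the end of some row) and, when the block length is positive,
-- permutations with negative entries, on which A's returned value is an accident of Python's
-- negative-index wraparound (B's slices are simply empty there).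
def Pre_permute_sudoku_blocks_horizontally (table : List (List Int)) (permutation : List Int) : Prop :=
  table ≠ [] ∧ permutation ≠ [] ∧
  ((table.headI).length / permutation.length = 0 ∨
    ((∀ p ∈ permutation, 0 ≤ p ∧
        ∀ row ∈ table, (p.toNat + 1) * ((table.headI).length / permutation.length) ≤ row.length) ∧
     ∀ row ∈ table, permutation.length * ((table.headI).length / permutation.length) ≤ row.length))
instance (table : List (List Int)) (permutation : List Int) : Decidable (Pre_permute_sudoku_blocks_horizontally table permutation) := by unfold Pre_permute_sudoku_blocks_horizontally; infer_instance

def pvWitness_permute_sudoku_blocks_horizontally : List (List Int) × List Int :=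
  ([[1, 2, 3, 4], [5, 6, 7, 8]], [1, 0])

def Spec_permute_sudoku_blocks_horizontally (table : List (List Int)) (permutation : List Int) (out : List (List Int)) : Prop := out = permute_sudoku_blocks_horizontally_alt table permutation
instance (table : List (List Int)) (permutation : List Int) (out : List (List Int)) : Decidable (Spec_permute_sudoku_blocks_horizontally table permutation out) := by unfold Spec_permute_sudoku_blocks_horizontally; infer_instance

-- ===== CLAIM (what is proved, stated in full; the proofs are below) =====
def Claim_equal_permute_sudoku_blocks_horizontally : Prop := ∀ (table : List (List Int)) (permutation : List Int), Dom_permute_sudoku_blocks_horizontally table permutation → Pre_permute_sudoku_blocks_horizontally table permutation → Spec_permute_sudoku_blocks_horizontally table permutation (permute_sudoku_blocks_horizontally table permutation)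

-- ===== LEMMAS AND PROOFS =====

-- Folds whose every step is a pySetD keep the state's length.
theorem pv_fold_set_len {α : Type} (d : α) (g : Nat → α → α) (bs : List Nat) :
    ∀ (st : List α),
    (bs.foldl (fun o (i : Nat) => PySem.List.pySetD o (i : Int) (g i (PySem.List.pyGetD o (i : Int) d))) st).length
      = st.length := by
  induction bs with
  | nil => intro st; rfl
  | cons b bs ih => intro st; rw [List.foldl_cons, ih]; simp

-- The innermost 'for row in range(height)' loop, elementwise.
theorem pv_getElem?_set {α : Type} (l : List α) (n : Nat) (a : α) (j : Nat) :
    (l.set n a)[j]? = if j = n ∧ n < l.length then some a else l[j]? := by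
  rw [List.getElem?_set]; split_ifs <;> simp_all

theorem pv_fold_rows_get {α : Type} (d : α) (g : Nat → α → α) :
    ∀ (h : Nat) (st : List α) (r : Nat),
    ((List.range h).foldl
        (fun o (i : Nat) => PySem.List.pySetD o (i : Int) (g i (PySem.List.pyGetD o (i : Int) d))) st)[r]?
      = if r < h then st[r]?.map (g r) else st[r]? := by
  intro h
  induction h with
  | zero => intro st r; simp
  | succ h ih =>
    intro st r
    rw [List.range_succ, List.foldl_append]
    set P := (List.range h).foldl
        (fun o (i : Nat) => PySem.List.pySetD o (i : Int) (g i (PySem.List.pyGetD o (i : Int) d))) st with hP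
    have hlen : P.length = st.length := pv_fold_set_len d g (List.range h) st
    simp only [List.foldl_cons, List.foldl_nil]
    rw [PySem.List.pySetD_natCast]
    have hPh : P[h]? = st[h]? := by rw [ih]; simp
    have hget : PySem.List.pyGetD P (h : Int) d = (st[h]?).getD d := by
      rw [PySem.List.pyGetD_natCast, List.getD_eq_getElem?_getD, hPh]
    rw [hget, pv_getElem?_set]
    by_cases hr : r = h
    · subst hr
      by_cases hlt : r < P.length
      · have hst : r < st.length := by omega
        rw [if_pos ⟨rfl, hlt⟩, if_pos (Nat.lt_succ_self r), List.getElem?_eq_getElem hst]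
        simp
      · have hnone : st[r]? = none := by rw [List.getElem?_eq_none_iff]; omega
        rw [if_neg (by tauto), ih, hnone]
        simp
    · rw [if_neg (by tauto), ih]
      by_cases hr2 : r < h
      · simp [hr2, show r < h + 1 by omega]
      · simp [hr2, show ¬ r < h + 1 by omega]

-- …hence it is a mapIdx.
theorem pv_fold_rows_eq_mapIdx {α : Type} (d : α) (g : Nat → α → α) (h : Nat)
    (st : List α) (hlen : st.length = h) :
    (List.range h).foldl
        (fun o (i : Nat) => PySem.List.pySetD o (i : Int) (g i (PySem.List.pyGetD o (i : Int) d))) st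
      = st.mapIdx g := by
  apply List.ext_getElem?
  intro r
  rw [pv_fold_rows_get, List.getElem?_mapIdx]
  by_cases hr : r < h
  · simp [hr]
  · have hnone : st[r]? = none := by rw [List.getElem?_eq_none_iff]; omega
    rw [hnone]
    simp [hr]

-- A fold of per-row (mapIdx) steps is one mapIdx of per-row folds.
theorem pv_foldl_steps {β : Type} (h : Nat) (step : List (List Int) → β → List (List Int))
    (G : Nat → β → List Int → List Int)
    (hstep : ∀ st b, st.length = h → step st b = st.mapIdx (fun r x => G r b x)) :
    ∀ (xs : List β) (st : List (List Int)), st.length = h →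
    xs.foldl step st = st.mapIdx (fun r x => xs.foldl (fun x b => G r b x) x) := by
  intro xs
  induction xs with
  | nil =>
    intro st _
    apply List.ext_getElem?
    intro r
    simp [List.getElem?_mapIdx]
  | cons b xs ih =>
    intro st hst
    rw [List.foldl_cons, hstep st b hst, ih _ (by simp [hst]), List.mapIdx_mapIdx]
    rfl

-- Writing one block: the 'for col in range(block_length)' loop splices a slice of row0 into orow.
theorem pv_block_write (row0 : List Int) (L : Nat) (dI : Nat) (s : Int) (hs : 0 ≤ s) :
    ∀ (t : Nat) (orow : List Int), dI * L + t ≤ orow.length → s.toNat * L + t ≤ row0.length →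
    (List.range t).foldl
        (fun o (col : Nat) => PySem.List.pySetD o ((dI : Int) * (L : Int) + (col : Int))
          (PySem.List.pyGetD row0 (s * (L : Int) + (col : Int)) 0)) orow
      = orow.take (dI * L) ++ (row0.drop (s.toNat * L)).take t ++ orow.drop (dI * L + t) := by
  intro t
  induction t with
  | zero => intro orow _ _; simp
  | succ t ih =>
    intro orow h1 h2
    rw [List.range_succ, List.foldl_append, ih orow (by omega) (by omega)]
    simp only [List.foldl_cons, List.foldl_nil]
    have hidx : (dI : Int) * (L : Int) + (t : Int) = ((dI * L + t : Nat) : Int) := by push_cast; ring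
    have hsrc : s * (L : Int) + (t : Int) = ((s.toNat * L + t : Nat) : Int) := by
      push_cast [Int.toNat_of_nonneg hs]; ring
    rw [hidx, hsrc, PySem.List.pySetD_natCast, PySem.List.pyGetD_natCast]
    have hvlt : s.toNat * L + t < row0.length := by omega
    have hv : row0.getD (s.toNat * L + t) 0 = row0[s.toNat * L + t] := by
      simp [List.getD_eq_getElem?_getD, List.getElem?_eq_getElem hvlt]
    rw [hv]
    have hta : (orow.take (dI * L)).length = dI * L := by rw [List.length_take]; omega
    have hseg : ((row0.drop (s.toNat * L)).take t).length = t := by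
      rw [List.length_take, List.length_drop]; omega
    have hdlt : dI * L + t < orow.length := by omega
    rw [List.drop_eq_getElem_cons hdlt]
    have hAB : (orow.take (dI * L) ++ (row0.drop (s.toNat * L)).take t).length = dI * L + t := by
      rw [List.length_append, hta, hseg]
    have hset : ∀ (X : List Int) (e v : Int) (rest : List Int),
        X.length = dI * L + t → (X ++ e :: rest).set (dI * L + t) v = X ++ v :: rest := by
      intro X e v rest hX
      rw [← hX]
      simp
    rw [hset _ _ _ _ hAB]
    have htk : (row0.drop (s.toNat * L)).take (t + 1)
        = (row0.drop (s.toNat * L)).take t ++ [row0[s.toNat * L + t]] := by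
      rw [List.take_add_one]
      congr 1
      rw [List.getElem?_drop, List.getElem?_eq_getElem hvlt]
      rfl
    rw [htk]
    simp [List.append_assoc, Nat.add_assoc]

theorem pv_drop_append_ge (AB C : List Int) (k : Nat) : (AB ++ C).drop (AB.length + k) = C.drop k := by
  simp [List.drop_append]

-- The per-row double loop over (dst block, col) equals slice concatenation.
theorem pv_per_row (row0 : List Int) (L : Nat) :
    ∀ (ps : List Int) (dI : Nat) (orow : List Int),
    (∀ p ∈ ps, 0 ≤ p ∧ (p.toNat + 1) * L ≤ row0.length) →
    (dI + ps.length) * L ≤ orow.length →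
    (PySem.List.enumerate ps (dI : Int)).foldl
        (fun o q => (List.range L).foldl
          (fun o (col : Nat) => PySem.List.pySetD o (q.1 * (L : Int) + (col : Int))
            (PySem.List.pyGetD row0 (q.2 * (L : Int) + (col : Int)) 0)) o) orow
      = orow.take (dI * L) ++ ps.flatMap (fun s => (row0.drop (s.toNat * L)).take L)
          ++ orow.drop ((dI + ps.length) * L) := by
  intro ps
  induction ps with
  | nil => intro dI orow _ _; simp
  | cons p ps ih =>
    intro dI orow hps hlen
    have hp := hps p List.mem_cons_self
    have hmul1 : (dI + 1) * L ≤ (dI + (p :: ps).length) * L :=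
      mul_le_mul_right' (by simp) L
    have he1 : (dI + 1) * L = dI * L + L := by ring
    have he2 : (dI + (p :: ps).length) * L = (dI + 1 + ps.length) * L := by
      rw [List.length_cons]; ring
    have hfit : dI * L + L ≤ orow.length := by omega
    have hread : p.toNat * L + L ≤ row0.length := by
      have h3 : (p.toNat + 1) * L = p.toNat * L + L := by ring
      have h4 := hp.2
      omega
    rw [PySem.List.enumerate_cons, List.foldl_cons]
    rw [pv_block_write row0 L dI p hp.1 L orow hfit hread]
    set seg := (row0.drop (p.toNat * L)).take L with hsegdef
    have hta : (orow.take (dI * L)).length = dI * L := by rw [List.length_take]; omega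
    have hseg : seg.length = L := by rw [hsegdef, List.length_take, List.length_drop]; omega
    set orow' := orow.take (dI * L) ++ seg ++ orow.drop (dI * L + L) with horow'
    have hlen' : orow'.length = orow.length := by
      rw [horow']
      simp only [List.length_append, List.length_drop, hta, hseg]
      omega
    have hcast : (dI : Int) + 1 = ((dI + 1 : Nat) : Int) := by omega
    rw [hcast, ih (dI + 1) orow' (fun q hq => hps q (List.mem_cons_of_mem _ hq))
      (by rw [hlen', ← he2]; exact hlen)]
    have hassoc : orow' = (orow.take (dI * L) ++ seg) ++ orow.drop (dI * L + L) :=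
      by rw [horow', List.append_assoc]
    have htake : orow'.take ((dI + 1) * L) = orow.take (dI * L) ++ seg := by
      rw [hassoc]
      exact List.take_left' (by rw [List.length_append, hta, hseg, he1])
    have hdrop : orow'.drop ((dI + 1 + ps.length) * L) = orow.drop ((dI + 1 + ps.length) * L) := by
      have hge : dI * L + L ≤ (dI + 1 + ps.length) * L := by
        have := mul_le_mul_right' (show dI + 1 ≤ dI + 1 + ps.length by omega) L
        omega
      have hAB : (orow.take (dI * L) ++ seg).length = dI * L + L := by
        rw [List.length_append, hta, hseg]
      have hk : (dI + 1 + ps.length) * L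
          = (orow.take (dI * L) ++ seg).length + ((dI + 1 + ps.length) * L - (dI * L + L)) := by
        rw [hAB]; omega
      rw [hassoc, hk, pv_drop_append_ge, List.drop_drop]
      congr 1
      omega
    rw [htake, hdrop, he2]
    simp [hsegdef, List.append_assoc]

-- B's slice of one block, for a non-negative source index.
theorem pv_slice_block (row : List Int) (L : Nat) (s : Int) (hs : 0 ≤ s) :
    PySem.List.slice row (some (s * (L : Int))) (some ((s + 1) * (L : Int)))
      = (row.drop (s.toNat * L)).take L := by
  have h1 : s * (L : Int) = ((s.toNat * L : Nat) : Int) := by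
    push_cast [Int.toNat_of_nonneg hs]
    ring
  have h2 : (s + 1) * (L : Int) = (((s.toNat + 1) * L : Nat) : Int) := by
    push_cast [Int.toNat_of_nonneg hs]; ring
  rw [h1, h2, PySem.List.slice_natCast]
  congr 1
  have h3 : (s.toNat + 1) * L = s.toNat * L + L := by ring
  omega


theorem pv_foldl_id {α β : Type} (xs : List β) (st : α) : xs.foldl (fun o _ => o) st = st := by
  induction xs generalizing st <;> simp_all

-- Replacing the read of table[r] by the mapIdx-bound row itself.
theorem pv_mapIdx_to_map (table : List (List Int)) (perm : List Int) (L : Nat) :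
    table.mapIdx (fun r x =>
        (PySem.List.enumerate perm).foldl (fun x q =>
          (List.range L).foldl (fun x (col : Nat) =>
            PySem.List.pySetD x (q.1 * (L : Int) + (col : Int))
              (PySem.List.pyGetD (PySem.List.pyGetD table (r : Int) []) (q.2 * (L : Int) + (col : Int)) 0)) x) x)
      = table.map (fun row =>
        (PySem.List.enumerate perm).foldl (fun x q =>
          (List.range L).foldl (fun x (col : Nat) =>
            PySem.List.pySetD x (q.1 * (L : Int) + (col : Int))
              (PySem.List.pyGetD row (q.2 * (L : Int) + (col : Int)) 0)) x) row) := by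
  apply List.ext_getElem?
  intro k
  rw [List.getElem?_mapIdx, List.getElem?_map]
  by_cases hlt : k < table.length
  · have hk : table[k]? = some (table[k]) := List.getElem?_eq_getElem hlt
    have hg : PySem.List.pyGetD table (k : Int) [] = table[k] := by
      rw [PySem.List.pyGetD_natCast, List.getD_eq_getElem?_getD, hk]
      rfl
    rw [hk]
    simp only [Option.map_some]
    rw [hg]
  · rw [List.getElem?_eq_none_iff.mpr (by omega)]
    rfl

-- ===== VERDICT (by name: the statement is the Claim_ definition above) =====
set_option maxHeartbeats 1000000 in
theorem permute_sudoku_blocks_horizontally_spec : Claim_equal_permute_sudoku_blocks_horizontally := by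
  intro table permutation _ hpre
  obtain ⟨hne, hpne, hcase⟩ := hpre
  unfold Spec_permute_sudoku_blocks_horizontally
  unfold permute_sudoku_blocks_horizontally permute_sudoku_blocks_horizontally_alt
  simp only [PySem.List.slice_none_none, List.map_id']
  rcases hcase with hL0 | ⟨hpb, hrow⟩
  · -- degenerate block length 0: A copies the table, B rebuilds each row unchanged
    rw [hL0]
    have h1 : ∀ (row : List Int) (src : Int),
        PySem.List.slice row (some (src * ((0 : Nat) : Int))) (some ((src + 1) * ((0 : Nat) : Int)))
          = ([] : List Int) := fun row src => by simp [pysem]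
    have h2 : ∀ (row : List Int),
        PySem.List.slice row (some ((permutation.length * 0 : Nat) : Int)) none = row :=
      fun row => by simp [pysem]
    simp only [List.range_zero, List.foldl_nil, pv_foldl_id, h1, List.append_nil, h2,
      List.nil_append, List.map_id']
  · -- main case
    rw [pv_foldl_steps table.length _
        (fun r q x => (List.range ((table.headI).length / permutation.length)).foldl
          (fun x (col : Nat) =>
            PySem.List.pySetD x (q.1 * (((table.headI).length / permutation.length : Nat) : Int) + (col : Int))
              (PySem.List.pyGetD (PySem.List.pyGetD table (r : Int) [])
                (q.2 * (((table.headI).length / permutation.length : Nat) : Int) + (col : Int)) 0)) x)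
        (fun st q hst => pv_foldl_steps table.length _
          (fun r (col : Nat) x =>
            PySem.List.pySetD x (q.1 * (((table.headI).length / permutation.length : Nat) : Int) + (col : Int))
              (PySem.List.pyGetD (PySem.List.pyGetD table (r : Int) [])
                (q.2 * (((table.headI).length / permutation.length : Nat) : Int) + (col : Int)) 0))
          (fun st' col h' => pv_fold_rows_eq_mapIdx [] _ table.length st' h')
          (List.range ((table.headI).length / permutation.length)) st hst)
        (PySem.List.enumerate permutation) table rfl]
    rw [pv_mapIdx_to_map table permutation ((table.headI).length / permutation.length)]
    apply List.map_congr_left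
    intro row hrowmem
    have hwrow := hrow row hrowmem
    have hb : ∀ p ∈ permutation, 0 ≤ p ∧
        (p.toNat + 1) * ((table.headI).length / permutation.length) ≤ row.length :=
      fun p hp => ⟨(hpb p hp).1, (hpb p hp).2 row hrowmem⟩
    have hA1 := pv_per_row row ((table.headI).length / permutation.length) permutation 0 row hb
      (by simpa using hwrow)
    simp only [Nat.cast_zero, Nat.zero_mul, List.take_zero, Nat.zero_add, List.nil_append] at hA1
    rw [hA1]
    have hBrow : permutation.foldl (fun nr src =>
          nr ++ PySem.List.slice row (some (src * (((table.headI).length / permutation.length : Nat) : Int)))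
            (some ((src + 1) * (((table.headI).length / permutation.length : Nat) : Int)))) []
        = permutation.flatMap (fun s =>
            (row.drop (s.toNat * ((table.headI).length / permutation.length))).take
              ((table.headI).length / permutation.length)) := by
      rw [PySem.List.foldl_congr_mem permutation _
        (fun nr src => nr ++ (row.drop (src.toNat * ((table.headI).length / permutation.length))).take
          ((table.headI).length / permutation.length)) []
        (fun acc x hx => by rw [pv_slice_block row _ x (hpb x hx).1])]
      rw [PySem.List.foldl_append_eq_flatMap]
      rfl
    rw [hBrow, PySem.List.slice_from_natCast]
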